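-- pv_equiv track=rewrite | github.com/gvsrgh/Computer-Networks-Lab-Programs | Exp - 5 Stuffing and Destuffing.py | char_destuffing
-- ===== SOURCE A (Python) =====
-- def char_destuffing(stuffed, flag=['STX', 'ETX'], esc='DLE'):
--     res = ''
--     i = 0
--     while i < len(stuffed):
--         if stuffed[i:i+3] == esc:
--             i += 3
--             res += stuffed[i:i+3]
--             i += 3
--         else:
--             res += stuffed[i]
--             i += 1
--     return res
-- ===== SOURCE B (Python) =====
-- def char_destuffing(stuffed, flag=['STX', 'ETX'], esc='DLE'):
--     # Jump between escape occurrences with str.find, copying the unescaped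
--     # gap and the escaped payload as whole slices.
--     n = len(esc)
--     parts = []
--     i = 0
--     while True:
--         j = stuffed.find(esc, i)
--         if j == -1:
--             parts.append(stuffed[i:])
--             break
--         parts.append(stuffed[i:j])
--         parts.append(stuffed[j + n:j + 2 * n])
--         i = j + 2 * n
--     return ''.join(parts)
-- ===== Notes on version B (the rewrite author's own statement) =====
-- stated objective: faster
-- what changed: B jumps between escape occurrences with str.find and copies the unescaped gaps and escaped payloads as whole slices joined at the end, instead of A's comparing a fresh 3-char slice at every position and growing the result one character at a time; Pre_ excludes the empty escape token (outside the natural domain: B's find-driven loop never advances there).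
-- intended difference: On inputs whose escape token has length other than 3 and occurs in the stuffed string (except the coincidental case of a single removable occurrence whose deletion equals deleting a trailing truncated match), A's hard-coded 3-char window ignores the escapes and returns the string essentially unchanged (e.g. 'aGObc' for esc='GO'), while B uses len(esc) and removes them ('abc'), the intended destuffing. — e.g. on char_destuffing("aGObc", ["STX", "ETX"], "GO"): A returns "aGObc", B returns "abc"
-- outside the precondition, e.g. on char_destuffing('ab', ['STX', 'ETX'], ''): A returns 'ab', B does not finish within the time limit
import Mathlib
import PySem

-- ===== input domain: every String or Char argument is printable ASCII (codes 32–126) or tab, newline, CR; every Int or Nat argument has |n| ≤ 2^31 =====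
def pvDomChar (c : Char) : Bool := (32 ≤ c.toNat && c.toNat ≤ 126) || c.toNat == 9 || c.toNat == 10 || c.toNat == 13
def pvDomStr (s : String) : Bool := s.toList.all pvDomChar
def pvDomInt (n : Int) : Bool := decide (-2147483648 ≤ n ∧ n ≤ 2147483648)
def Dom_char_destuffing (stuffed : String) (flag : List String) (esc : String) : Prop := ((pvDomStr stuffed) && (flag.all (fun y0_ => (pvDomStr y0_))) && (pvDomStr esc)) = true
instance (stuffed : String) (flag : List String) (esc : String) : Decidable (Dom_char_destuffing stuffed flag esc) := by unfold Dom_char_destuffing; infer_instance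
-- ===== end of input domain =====

-- B jumps between escape occurrences with str.find (using len(esc)) and joins whole
-- slices, instead of A's per-position hard-coded 3-char window; they agree wherever
-- the escape has length 3, and differ (B doing the intended removal) on D_ below.

-- ===== PORT A =====
-- while i < len(stuffed): if stuffed[i:i+3] == esc: i += 3; res += stuffed[i:i+3]; i += 3
--                         else: res += stuffed[i]; i += 1
def pvAloop (s e : List Char) (i : Nat) (res : List Char) : List Char :=
  if h : i < s.length then
    if PySem.List.slice s (some (i : Int)) (some ((i : Int) + 3)) = e then
      pvAloop s e (i + 6) (res ++ PySem.List.slice s (some ((i : Int) + 3)) (some ((i : Int) + 6)))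
    else
      pvAloop s e (i + 1) (res ++ [s[i]])
  else res
termination_by s.length - i

def char_destuffing (stuffed : String) (flag : List String) (esc : String) : String :=
  String.ofList (pvAloop stuffed.toList esc.toList 0 [])

-- ===== PORT B =====
-- n = len(esc)
-- while True: j = stuffed.find(esc, i)
--             if j == -1: parts.append(stuffed[i:]); break
--             parts.append(stuffed[i:j]); parts.append(stuffed[j+n:j+2*n]); i = j+2*n
-- (the fuel argument only totalizes the while-True loop; len(stuffed)+2 iterations
--  always suffice when esc is nonempty, i.e. on Pre_)
def pvBloop (s e : List Char) (n : Int) : Nat → Nat → List Char → List Char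
  | 0, _, parts => parts
  | fuel + 1, i, parts =>
    let j := PySem.Chars.findFrom s e (i : Int) none
    if j = -1 then parts ++ PySem.List.slice s (some (i : Int)) none
    else pvBloop s e n fuel (j + 2 * n).toNat
      (parts ++ PySem.List.slice s (some (i : Int)) (some j)
             ++ PySem.List.slice s (some (j + n)) (some (j + 2 * n)))

def char_destuffing_alt (stuffed : String) (flag : List String) (esc : String) : String :=
  String.ofList (pvBloop stuffed.toList esc.toList (esc.toList.length : Int)
    (stuffed.toList.length + 2) 0 [])

-- ===== PRECONDITION & SPEC =====
-- Pre_ excludes only the empty escape token, which is outside the task's natural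
-- domain: A happens to return the input unchanged there, while B's find-driven
-- loop never advances (it diverges).
def Pre_char_destuffing (stuffed : String) (flag : List String) (esc : String) : Prop :=
  esc ≠ ""
instance (stuffed : String) (flag : List String) (esc : String) : Decidable (Pre_char_destuffing stuffed flag esc) := by unfold Pre_char_destuffing; infer_instance

def pvWitness_char_destuffing : String × List String × String := ("aDLEbcSTX", ["STX", "ETX"], "DLE")

-- On inputs whose escape token has length ≠ 3 and occurs in the stuffed string,
-- A's hard-coded 3-char window ignores the escapes (except a truncated match at
-- the very end), while B uses len(esc) and removes them — the intended
-- destuffing; the last conjunct carves out exactly the coincidental inputs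
-- (single removable occurrence whose deletion equals deleting the trailing one)
-- where the two values agree anyway.
def D_char_destuffing (stuffed : String) (flag : List String) (esc : String) : Prop :=
  let s := stuffed.toList
  let e := esc.toList
  let j := (PySem.Chars.find s e).toNat
  e.length ≠ 3 ∧ e <:+: s ∧
  ¬ (e.length < 3 ∧ s.drop (j + e.length) ++ e <:+ s ∧ s.length < j + 3 * e.length)
instance (stuffed : String) (flag : List String) (esc : String) : Decidable (D_char_destuffing stuffed flag esc) := by unfold D_char_destuffing; infer_instance

def Spec_char_destuffing (stuffed : String) (flag : List String) (esc : String) (out : String) : Prop := ¬ D_char_destuffing stuffed flag esc → out = char_destuffing_alt stuffed flag esc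
instance (stuffed : String) (flag : List String) (esc : String) (out : String) : Decidable (Spec_char_destuffing stuffed flag esc out) := by unfold Spec_char_destuffing; infer_instance

def pvDiffWitness_char_destuffing : String × List String × String := ("aGObc", ["STX", "ETX"], "GO")
def pvDiffWitnessOut_char_destuffing : String × String := ("aGObc", "abc")

-- ===== CLAIM (what is proved, stated in full; the proofs are below) =====
def Claim_unchanged_char_destuffing : Prop := ∀ (stuffed : String) (flag : List String) (esc : String), Dom_char_destuffing stuffed flag esc → Pre_char_destuffing stuffed flag esc → Spec_char_destuffing stuffed flag esc (char_destuffing stuffed flag esc)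
def Claim_changed_char_destuffing : Prop := Dom_char_destuffing (pvDiffWitness_char_destuffing.1) (pvDiffWitness_char_destuffing.2.1) (pvDiffWitness_char_destuffing.2.2) ∧ Pre_char_destuffing (pvDiffWitness_char_destuffing.1) (pvDiffWitness_char_destuffing.2.1) (pvDiffWitness_char_destuffing.2.2) ∧ D_char_destuffing (pvDiffWitness_char_destuffing.1) (pvDiffWitness_char_destuffing.2.1) (pvDiffWitness_char_destuffing.2.2) ∧ char_destuffing (pvDiffWitness_char_destuffing.1) (pvDiffWitness_char_destuffing.2.1) (pvDiffWitness_char_destuffing.2.2) = pvDiffWitnessOut_char_destuffing.1 ∧ char_destuffing_alt (pvDiffWitness_char_destuffing.1) (pvDiffWitness_char_destuffing.2.1) (pvDiffWitness_char_destuffing.2.2) = pvDiffWitnessOut_char_destuffing.2 ∧ pvDiffWitnessOut_char_destuffing.1 ≠ pvDiffWitnessOut_char_destuffing.2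
def Claim_exact_char_destuffing : Prop := ∀ (stuffed : String) (flag : List String) (esc : String), Dom_char_destuffing stuffed flag esc → Pre_char_destuffing stuffed flag esc → D_char_destuffing stuffed flag esc → char_destuffing stuffed flag esc ≠ char_destuffing_alt stuffed flag esc

-- ===== LEMMAS AND PROOFS =====

-- a found index is ≥ the start, and the start is in range
lemma pvFindFrom_pos {s e : List Char} {i : Nat}
    (h : PySem.Chars.findFrom s e (i : Int) none ≠ -1) :
    i ≤ s.length ∧ (i : Int) ≤ PySem.Chars.findFrom s e (i : Int) none := by
  by_cases hi : i ≤ s.length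
  · exact ⟨hi, (PySem.Chars.findFrom_natCast_spec s e i hi h).1⟩
  · exfalso
    apply h
    simp only [PySem.Chars.findFrom]
    have h1 : ¬ ((i : Int) < 0) := by omega
    have h2 : ((s.length : Int)) < (i : Int) := by omega
    simp [h1, h2]

-- the two slices A takes, as take/drop
lemma pvSliceWin (s : List Char) (i : Nat) :
    PySem.List.slice s (some (i : Int)) (some ((i : Int) + 3)) = (s.drop i).take 3 := by
  exact_mod_cast PySem.List.slice_natCast_add s i 3

lemma pvSliceCopy (s : List Char) (i : Nat) :
    PySem.List.slice s (some ((i : Int) + 3)) (some ((i : Int) + 6)) = (s.drop (i + 3)).take 3 := by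
  have := PySem.List.slice_natCast_add s (i + 3) 3
  push_cast at this
  convert this using 3

-- A past the end returns the accumulator
lemma pvAloop_stop (s e res : List Char) (i : Nat) (h : s.length ≤ i) :
    pvAloop s e i res = res := by
  rw [pvAloop]
  simp [Nat.not_lt.mpr h]

-- A walks match-free positions one char at a time: skip from i to j verbatim
lemma pvAloop_skip (s e : List Char) (j : Nat) (hj : j ≤ s.length) :
    ∀ d i res, j - i = d → i ≤ j → (∀ k, i ≤ k → k < j → (s.drop k).take 3 ≠ e) →
      pvAloop s e i res = pvAloop s e j (res ++ (s.drop i).take (j - i)) := by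
  intro d
  induction d with
  | zero =>
    intro i res hd hij _
    have : i = j := by omega
    subst this
    simp
  | succ m ih =>
    intro i res hd hij hno
    have hij' : i < j := by omega
    have hin : i < s.length := by omega
    rw [pvAloop]
    rw [dif_pos hin, pvSliceWin, if_neg (hno i le_rfl hij')]
    rw [ih (i + 1) (res ++ [s[i]]) (by omega) (by omega)
        (fun k hk1 hk2 => hno k (by omega) hk2)]
    congr 1
    rw [List.append_assoc]
    congr 1
    rw [List.drop_eq_getElem_cons hin]
    have : j - i = (j - (i + 1)) + 1 := by omega
    rw [this, List.take_succ_cons]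
    simp

-- A's escape step
lemma pvAloop_match (s e res : List Char) (i : Nat) (hin : i < s.length)
    (hm : (s.drop i).take 3 = e) :
    pvAloop s e i res = pvAloop s e (i + 6) (res ++ (s.drop (i + 3)).take 3) := by
  rw [pvAloop]
  rw [dif_pos hin, pvSliceWin, if_pos hm, pvSliceCopy]

-- with a 3-char escape, A's window test is exactly "e is a prefix here"
lemma pvMatch3 (s e : List Char) (h3 : e.length = 3) (k : Nat) :
    (s.drop k).take 3 = e ↔ e <+: s.drop k := by
  constructor
  · intro h
    rw [← h]
    exact List.take_prefix 3 (s.drop k)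
  · intro h
    have := List.prefix_iff_eq_take.mp h
    rw [h3] at this
    exact this.symm

-- with an escape of another length, the truncated window matches only a full tail
lemma pvMatchNe3 (s e : List Char) (h3 : e.length ≠ 3) (k : Nat) (hk : k < s.length) :
    (s.drop k).take 3 = e ↔ (s.drop k = e ∧ e.length < 3) := by
  constructor
  · intro h
    by_cases hlen : 3 ≤ (s.drop k).length
    · exfalso
      apply h3
      rw [← h, List.length_take]
      omega
    · rw [List.take_of_length_le (by omega)] at h
      have : e.length < 3 := by
        rw [← h]
        omega
      exact ⟨h, this⟩
  · rintro ⟨h, hl⟩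
    rw [List.take_of_length_le (by rw [h]; omega)]
    exact h

-- B's loop when no further occurrence exists: one find, then the tail slice
lemma pvBloop_none (s e : List Char) (n : Int) (fuel i : Nat) (parts : List Char)
    (hj : PySem.Chars.findFrom s e (i : Int) none = -1) :
    pvBloop s e n (fuel + 1) i parts = parts ++ PySem.List.slice s (some (i : Int)) none := by
  simp only [pvBloop]
  rw [if_pos hj]

-- core of the equivalence for a 3-char escape: A's per-position scan equals
-- B's find-driven loop with n = 3, for any sufficient fuel and any accumulator
lemma pvAB (s e : List Char) (h3 : e.length = 3) :
    ∀ fuel i res, s.length + 2 ≤ i + 2 * fuel →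
      pvAloop s e i res = pvBloop s e 3 fuel i res := by
  intro fuel
  induction fuel with
  | zero =>
    intro i res hd
    rw [pvAloop_stop s e res i (by omega)]
    rfl
  | succ m ih =>
    intro i res hd
    by_cases hj : PySem.Chars.findFrom s e (i : Int) none = -1
    · -- no further occurrence: A copies the rest verbatim
      simp only [pvBloop, hj, if_pos, PySem.List.slice_from_natCast]
      by_cases hi : i ≤ s.length
      · have hocc : ¬ e <:+: s.drop i :=
          (PySem.Chars.findFrom_natCast_eq_neg_one_iff s e i hi).mp hj
        have hno : ∀ k, i ≤ k → k < s.length → (s.drop k).take 3 ≠ e := by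
          intro k hk1 hk2 hm
          apply hocc
          have hpre : e <+: s.drop k := (pvMatch3 s e h3 k).mp hm
          have : s.drop k = (s.drop i).drop (k - i) := by
            rw [List.drop_drop]
            congr 1
            omega
          rw [this] at hpre
          exact hpre.isInfix.trans (List.drop_suffix (k - i) (s.drop i)).isInfix
        rw [pvAloop_skip s e s.length le_rfl (s.length - i) i res rfl hi hno,
            pvAloop_stop s e _ s.length le_rfl]
        congr 1
        exact List.take_of_length_le (by simp)
      · rw [pvAloop_stop s e res i (by omega)]
        simp [List.drop_eq_nil_of_le (by omega : s.length ≤ i)]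
    · -- an occurrence at J: A walks to it, takes the escape step, and both recurse
      have hi : i ≤ s.length := (pvFindFrom_pos hj).1
      have hspec := PySem.Chars.findFrom_natCast_spec s e i hi hj
      set j := PySem.Chars.findFrom s e (i : Int) none with hjdef
      have hj0 : 0 ≤ j := le_trans (by omega) hspec.1
      have hjJ : ((j.toNat : Nat) : Int) = j := Int.toNat_of_nonneg hj0
      set J := j.toNat with hJdef
      have hiJ : i ≤ J := by omega
      have hpre : e <+: s.drop J := hspec.2.1
      have hJ3 : J + 3 ≤ s.length := by
        have := hpre.length_le
        simp [h3] at this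
        omega
      have hno : ∀ k, i ≤ k → k < J → (s.drop k).take 3 ≠ e := by
        intro k hk1 hk2 hm
        exact hspec.2.2 k hk1 hk2 ((pvMatch3 s e h3 k).mp hm)
      rw [pvAloop_skip s e J (by omega) (J - i) i res rfl hiJ hno,
          pvAloop_match s e _ J (by omega) ((pvMatch3 s e h3 J).mpr hpre)]
      simp only [pvBloop]
      rw [← hjdef, if_neg hj]
      have hnext : (j + 2 * 3).toNat = J + 6 := by omega
      rw [hnext, ih (J + 6) _ (by omega)]
      congr 2
      · congr 1
        rw [← hjJ]
        exact_mod_cast (PySem.List.slice_natCast s i J).symm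
      · rw [← hjJ]
        have := pvSliceCopy s J
        rw [← this]
        norm_num

-- A with a degenerate-length escape: only a full trailing match ever fires
lemma pvAloopNe3 (s e : List Char) (h3 : e.length ≠ 3) :
    pvAloop s e 0 [] =
      (if (0 < e.length ∧ e.length < 3) ∧ e <:+ s then s.take (s.length - e.length) else s) := by
  by_cases hc : (0 < e.length ∧ e.length < 3) ∧ e <:+ s
  · rw [if_pos hc]
    obtain ⟨⟨hl0, hl3⟩, hsuf⟩ := hc
    have hLn : e.length ≤ s.length := hsuf.length_le
    have hdropk : s.drop (s.length - e.length) = e := (List.suffix_iff_eq_drop.mp hsuf).symm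
    have hk0 : s.length - e.length < s.length := by omega
    have hno : ∀ k, 0 ≤ k → k < s.length - e.length → (s.drop k).take 3 ≠ e := by
      intro k _ hk hm
      obtain ⟨heq, -⟩ := (pvMatchNe3 s e h3 k (by omega)).mp hm
      have : (s.drop k).length = e.length := by rw [heq]
      simp at this
      omega
    rw [pvAloop_skip s e (s.length - e.length) (by omega) (s.length - e.length) 0 [] (by omega)
        (by omega) hno]
    have hm : (s.drop (s.length - e.length)).take 3 = e :=
      (pvMatchNe3 s e h3 (s.length - e.length) hk0).mpr ⟨hdropk, hl3⟩
    rw [pvAloop_match s e _ (s.length - e.length) hk0 hm,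
        pvAloop_stop s e _ _ (by omega)]
    have hnil : s.drop (s.length - e.length + 3) = [] := List.drop_eq_nil_of_le (by omega)
    rw [hnil]
    simp
  · rw [if_neg hc]
    have hno : ∀ k, 0 ≤ k → k < s.length → (s.drop k).take 3 ≠ e := by
      intro k _ hk hm
      obtain ⟨heq, hl3⟩ := (pvMatchNe3 s e h3 k hk).mp hm
      apply hc
      have hsuf : e <:+ s := heq ▸ List.drop_suffix k s
      have hlen : e.length = s.length - k := by rw [← heq]; simp
      exact ⟨⟨by omega, hl3⟩, hsuf⟩
    rw [pvAloop_skip s e s.length le_rfl s.length 0 [] (by omega) (by omega) hno,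
        pvAloop_stop s e _ _ le_rfl]
    simp

-- B's loop when an occurrence is found: one step of the recursion
lemma pvBloop_found (s e : List Char) (n : Int) (fuel i : Nat) (parts : List Char)
    (hj : PySem.Chars.findFrom s e (i : Int) none ≠ -1) :
    pvBloop s e n (fuel + 1) i parts =
      pvBloop s e n fuel ((PySem.Chars.findFrom s e (i : Int) none) + 2 * n).toNat
        (parts ++ PySem.List.slice s (some (i : Int)) (some (PySem.Chars.findFrom s e (i : Int) none))
               ++ PySem.List.slice s (some ((PySem.Chars.findFrom s e (i : Int) none) + n))
                  (some ((PySem.Chars.findFrom s e (i : Int) none) + 2 * n))) := by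
  simp only [pvBloop]
  rw [if_neg hj]

-- the first full occurrence of e in s, with its basic facts
lemma pvFind_facts (s e : List Char) (hinf : e <:+: s) :
    PySem.Chars.findFrom s e ((0 : Nat) : Int) none ≠ -1 ∧
    0 ≤ PySem.Chars.findFrom s e ((0 : Nat) : Int) none ∧
    PySem.Chars.findFrom s e ((0 : Nat) : Int) none = PySem.Chars.find s e := by
  have hne : PySem.Chars.findFrom s e ((0 : Nat) : Int) none ≠ -1 := by
    intro h
    have := (PySem.Chars.findFrom_natCast_eq_neg_one_iff s e 0 (by omega)).mp h
    simp only [List.drop_zero] at this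
    exact this hinf
  have hspec := PySem.Chars.findFrom_natCast_spec s e 0 (by omega) hne
  exact ⟨hne, by exact_mod_cast hspec.1, by simp⟩

-- evaluate B's loop when there is an occurrence but none after the skip:
-- the loop runs exactly twice and deletes the first occurrence
lemma pvB_eval (s e : List Char) (hinf : e <:+: s)
    (hocc2 : ¬ e <:+: s.drop ((PySem.Chars.find s e).toNat + 2 * e.length)) :
    pvBloop s e (e.length : Int) (s.length + 2) 0 [] =
      s.take (PySem.Chars.find s e).toNat ++
        s.drop ((PySem.Chars.find s e).toNat + e.length) := by
  obtain ⟨hne, hF0, hFf⟩ := pvFind_facts s e hinf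
  set F := PySem.Chars.findFrom s e ((0 : Nat) : Int) none with hFdef
  set J := F.toNat with hJdef
  have hFJ : ((J : Nat) : Int) = F := Int.toNat_of_nonneg hF0
  have hJfind : J = (PySem.Chars.find s e).toNat := by rw [hJdef, hFf]
  have h2 : s.length + 2 = (s.length + 1) + 1 := rfl
  rw [h2, pvBloop_found s e _ (s.length + 1) 0 [] hne]
  have hnext : (F + 2 * ((e.length : Nat) : Int)).toNat = J + 2 * e.length := by omega
  rw [← hFdef, hnext]
  have hocc2' : ¬ e <:+: s.drop (J + 2 * e.length) := by
    rw [hJfind]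
    exact hocc2
  have hj2 : PySem.Chars.findFrom s e (((J + 2 * e.length : Nat)) : Int) none = -1 := by
    by_cases hle : J + 2 * e.length ≤ s.length
    · exact (PySem.Chars.findFrom_natCast_eq_neg_one_iff s e _ hle).mpr hocc2'
    · by_contra h
      exact absurd (pvFindFrom_pos h).1 hle
  have h1 : s.length + 1 = s.length + 1 := rfl
  rw [show s.length + 1 = s.length + 1 from rfl,
      pvBloop_none s e _ s.length (J + 2 * e.length) _ hj2]
  have hgap : PySem.List.slice s (some ((0 : Nat) : Int)) (some F) = s.take J := by
    rw [← hFJ]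
    have h := PySem.List.slice_natCast s 0 J
    simp only [Nat.cast_zero, Nat.sub_zero, List.drop_zero] at h
    exact_mod_cast h
  have hpay : PySem.List.slice s (some (F + ((e.length : Nat) : Int)))
      (some (F + 2 * ((e.length : Nat) : Int))) = (s.drop (J + e.length)).take e.length := by
    have h1 : F + ((e.length : Nat) : Int) = (((J + e.length : Nat)) : Int) := by omega
    have h2' : F + 2 * ((e.length : Nat) : Int) = (((J + e.length : Nat)) : Int) + ((e.length : Nat) : Int) := by omega
    rw [h1, h2']
    exact PySem.List.slice_natCast_add s (J + e.length) e.length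
  rw [hgap, hpay, PySem.List.slice_from_natCast]
  have htail : s.drop (J + 2 * e.length) = (s.drop (J + e.length)).drop e.length := by
    rw [List.drop_drop]
    congr 1
    omega
  rw [htail, List.nil_append, List.append_assoc, List.take_append_drop, hJfind]

-- one selected occurrence deletes at least e.length characters
lemma pvB_len1 (s e : List Char) (hn : 0 < e.length) :
    ∀ (fuel i : Nat) (acc : List Char), PySem.Chars.findFrom s e (i : Int) none ≠ -1 →
      (pvBloop s e (e.length : Int) fuel i acc).length + e.length + i ≤ acc.length + s.length := by
  intro fuel
  induction fuel with
  | zero =>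
    intro i acc hj
    have hi := (pvFindFrom_pos hj).1
    have hspec := PySem.Chars.findFrom_natCast_spec s e i hi hj
    have hOcc := hspec.2.1.length_le
    have hiF := hspec.1
    have hF0 : 0 ≤ PySem.Chars.findFrom s e (i : Int) none := by omega
    have hdl : (s.drop (PySem.Chars.findFrom s e (i : Int) none).toNat).length
        = s.length - (PySem.Chars.findFrom s e (i : Int) none).toNat := by
      simp
    simp only [pvBloop]
    omega
  | succ m ih =>
    intro i acc hj
    have hi := (pvFindFrom_pos hj).1
    have hspec := PySem.Chars.findFrom_natCast_spec s e i hi hj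
    set F := PySem.Chars.findFrom s e (i : Int) none with hFdef
    have hF0 : 0 ≤ F := by omega
    set J := F.toNat with hJdef
    have hFJ : ((J : Nat) : Int) = F := Int.toNat_of_nonneg hF0
    have hiJ : i ≤ J := by omega
    have hJn : J + e.length ≤ s.length := by
      have := hspec.2.1.length_le
      have hdl : (s.drop J).length = s.length - J := by simp
      omega
    rw [pvBloop_found s e _ m i acc hj]
    rw [← hFdef]
    have hnext : (F + 2 * ((e.length : Nat) : Int)).toNat = J + 2 * e.length := by omega
    rw [hnext]
    have hgap : (PySem.List.slice s (some (i : Int)) (some F)).length = min (J - i) (s.length - i) := by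
      rw [← hFJ]
      have := PySem.List.slice_natCast s i J
      rw [this]
      simp
    have hpay : (PySem.List.slice s (some (F + ((e.length : Nat) : Int)))
        (some (F + 2 * ((e.length : Nat) : Int)))).length = min e.length (s.length - (J + e.length)) := by
      have h1 : F + ((e.length : Nat) : Int) = (((J + e.length : Nat)) : Int) := by omega
      have h2' : F + 2 * ((e.length : Nat) : Int) = (((J + e.length : Nat)) : Int) + ((e.length : Nat) : Int) := by omega
      rw [h1, h2', PySem.List.slice_natCast_add s (J + e.length) e.length]
      simp
    by_cases hj2 : PySem.Chars.findFrom s e ((J + 2 * e.length : Nat) : Int) none = -1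
    · cases m with
      | zero =>
        simp only [pvBloop]
        simp only [List.length_append]
        omega
      | succ m' =>
        rw [pvBloop_none s e _ m' (J + 2 * e.length) _ hj2]
        rw [PySem.List.slice_from_natCast]
        simp only [List.length_append, List.length_drop]
        omega
    · have := ih (J + 2 * e.length)
        (acc ++ PySem.List.slice s (some (i : Int)) (some F)
             ++ PySem.List.slice s (some (F + ((e.length : Nat) : Int)))
                (some (F + 2 * ((e.length : Nat) : Int)))) hj2
      simp only [List.length_append] at this ⊢
      omega

-- two selected occurrences delete at least 2·e.length characters
lemma pvB_len2 (s e : List Char) (hn : 0 < e.length)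
    (fuel i : Nat) (acc : List Char)
    (hj : PySem.Chars.findFrom s e (i : Int) none ≠ -1)
    (hj2 : PySem.Chars.findFrom s e
      (((PySem.Chars.findFrom s e (i : Int) none).toNat + 2 * e.length : Nat) : Int) none ≠ -1) :
    (pvBloop s e (e.length : Int) fuel i acc).length + 2 * e.length + i ≤ acc.length + s.length := by
  have hi := (pvFindFrom_pos hj).1
  have hspec := PySem.Chars.findFrom_natCast_spec s e i hi hj
  set F := PySem.Chars.findFrom s e (i : Int) none with hFdef
  have hF0 : 0 ≤ F := by omega
  set J := F.toNat with hJdef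
  have hFJ : ((J : Nat) : Int) = F := Int.toNat_of_nonneg hF0
  have hiJ : i ≤ J := by omega
  have hi2 := (pvFindFrom_pos hj2).1
  cases fuel with
  | zero =>
    simp only [pvBloop]
    omega
  | succ m =>
    rw [pvBloop_found s e _ m i acc hj, ← hFdef]
    have hnext : (F + 2 * ((e.length : Nat) : Int)).toNat = J + 2 * e.length := by omega
    rw [hnext]
    have hgap : (PySem.List.slice s (some (i : Int)) (some F)).length = min (J - i) (s.length - i) := by
      rw [← hFJ]
      rw [PySem.List.slice_natCast s i J]
      simp
    have hpay : (PySem.List.slice s (some (F + ((e.length : Nat) : Int)))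
        (some (F + 2 * ((e.length : Nat) : Int)))).length = min e.length (s.length - (J + e.length)) := by
      have h1 : F + ((e.length : Nat) : Int) = (((J + e.length : Nat)) : Int) := by omega
      have h2' : F + 2 * ((e.length : Nat) : Int) = (((J + e.length : Nat)) : Int) + ((e.length : Nat) : Int) := by omega
      rw [h1, h2', PySem.List.slice_natCast_add s (J + e.length) e.length]
      simp
    have := pvB_len1 s e hn m (J + 2 * e.length)
        (acc ++ PySem.List.slice s (some (i : Int)) (some F)
             ++ PySem.List.slice s (some (F + ((e.length : Nat) : Int)))
                (some (F + 2 * ((e.length : Nat) : Int)))) hj2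
    simp only [List.length_append] at this ⊢
    omega

-- ofList is injective
lemma pvOfList_inj {a b : List Char} (h : String.ofList a = String.ofList b) : a = b := by
  have := congrArg String.toList h
  simpa using this

-- a nonempty escape occurring from position k means k + |e| ≤ |s|
lemma pvInfix_drop_le (s e : List Char) (k : Nat) (hne : e ≠ [])
    (h : e <:+: s.drop k) : k + e.length ≤ s.length := by
  have h1 := h.length_le
  have h2 : 0 < e.length := List.length_pos_iff.mpr hne
  simp only [List.length_drop] at h1
  omega

-- the first occurrence, as a prefix fact, and its room in s
lemma pvFind_prefix (s e : List Char) (hne : e ≠ []) (hinf : e <:+: s) :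
    e <+: s.drop (PySem.Chars.find s e).toNat ∧
    (PySem.Chars.find s e).toNat + e.length ≤ s.length := by
  obtain ⟨hne', hF0, hFf⟩ := pvFind_facts s e hinf
  have hspec := PySem.Chars.findFrom_natCast_spec s e 0 (by omega) hne'
  constructor
  · rw [← hFf]
    exact hspec.2.1
  · have := pvInfix_drop_le s e (PySem.Chars.findFrom s e ((0 : Nat) : Int) none).toNat hne
      hspec.2.1.isInfix
    rw [← hFf]
    omega

-- the combined coincidence condition: s[j+n:] ++ e a suffix of s means exactly
-- "e is a suffix of s and deleting the occurrence at j equals deleting the tail"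
lemma pvComb (s e : List Char) (j : Nat) (hJn : j + e.length ≤ s.length) :
    s.drop (j + e.length) ++ e <:+ s ↔
      (e <:+ s ∧ s.drop (j + e.length) = (s.take (s.length - e.length)).drop j) := by
  have hd : (s.drop (j + e.length)).length = s.length - j - e.length := by
    rw [List.length_drop]
    omega
  have hlen : (s.drop (j + e.length) ++ e).length = s.length - j := by
    rw [List.length_append, hd]
    omega
  have hperlem : (s.take (s.length - e.length)).drop j
      = (s.drop j).take (s.length - j - e.length) := by
    rw [List.drop_take]
    congr 1
    omega
  constructor
  · intro h
    have heq : s.drop (j + e.length) ++ e = s.drop j := by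
      have h2 := List.suffix_iff_eq_drop.mp h
      rw [h2, hlen]
      congr 1
      omega
    constructor
    · rw [List.suffix_iff_eq_drop]
      have h3 : (s.drop j).drop (s.length - j - e.length) = e := by
        rw [← heq, ← hd, List.drop_left]
      rw [List.drop_drop] at h3
      have hx : j + (s.length - j - e.length) = s.length - e.length := by omega
      rw [hx] at h3
      exact h3.symm
    · rw [hperlem]
      have h4 := congrArg (List.take (s.length - j - e.length)) heq
      rw [← hd, List.take_left, hd] at h4
      exact h4
  · rintro ⟨hsuf, hper⟩
    have heq : s.drop j = s.drop (j + e.length) ++ e := by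
      nth_rewrite 1 [← List.take_append_drop (s.length - j - e.length) (s.drop j)]
      congr 1
      · rw [← hperlem, hper]
      · rw [List.drop_drop]
        have hx : j + (s.length - j - e.length) = s.length - e.length := by omega
        rw [hx]
        exact (List.suffix_iff_eq_drop.mp hsuf).symm
    rw [← heq]
    exact List.drop_suffix j s

-- if s is n-periodic from j on and long enough, e occurs again at j + 2n
lemma pvPer_occ (s e : List Char) (j : Nat) (hpre : e <+: s.drop j)
    (hper : s.drop (j + e.length) <+: s.drop j) (hL : j + 3 * e.length ≤ s.length) :
    e <+: s.drop (j + 2 * e.length) := by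
  have h1 : e = (s.drop j).take e.length := by
    have := List.prefix_iff_eq_take.mp hpre
    exact this
  have h2 : s.drop (j + e.length) = (s.drop j).take (s.length - (j + e.length)) := by
    have := List.prefix_iff_eq_take.mp hper
    simpa using this
  have h3 : s.drop (j + 2 * e.length) = (s.drop (j + e.length)).drop e.length := by
    rw [List.drop_drop]
    congr 1
    omega
  have h4 : (s.drop (j + e.length)).take e.length = e := by
    rw [h2, List.take_take]
    have hm : min e.length (s.length - (j + e.length)) = e.length := by omega
    rw [hm, ← h1]
  have h5 : (s.drop (j + 2 * e.length)).take e.length = e := by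
    rw [h3, h2, List.drop_take, List.take_take]
    have hm : min e.length (s.length - (j + e.length) - e.length) = e.length := by omega
    rw [hm, List.drop_drop]
    exact h4
  exact List.prefix_iff_eq_take.mpr h5.symm

-- the first occurrence is no later than the trailing one
lemma pvFind_le_suffix (s e : List Char) (hne : e ≠ []) (hsuf : e <:+ s) :
    (PySem.Chars.find s e).toNat ≤ s.length - e.length := by
  have hinf : e <:+: s := hsuf.isInfix
  obtain ⟨hne', hF0, hFf⟩ := pvFind_facts s e hinf
  have hspec := PySem.Chars.findFrom_natCast_spec s e 0 (by omega) hne'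
  have hdropm : s.drop (s.length - e.length) = e := (List.suffix_iff_eq_drop.mp hsuf).symm
  have hLn : e.length ≤ s.length := hsuf.length_le
  by_contra h
  have hm : s.length - e.length < (PySem.Chars.findFrom s e ((0 : Nat) : Int) none).toNat := by
    rw [hFf]; omega
  exact hspec.2.2 (s.length - e.length) (by omega) hm (by rw [hdropm])

-- ===== VERDICT (by name: the statements are the Claim_ definitions above) =====
theorem char_destuffing_spec : Claim_unchanged_char_destuffing := by
  intro stuffed flag esc _ hpre
  unfold Spec_char_destuffing
  intro hnd
  unfold char_destuffing char_destuffing_alt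
  set s := stuffed.toList with hs
  set e := esc.toList with he
  by_cases h3 : e.length = 3
  · simp only [h3, Nat.cast_ofNat]
    rw [pvAB s e h3 (s.length + 2) 0 [] (by omega)]
  · -- ¬D_ with esc ≠ "": either e never occurs in s, or the coincidence case
    have hene : e ≠ [] := by
      intro h
      apply hpre
      have h' : esc.toList = [] := by rw [← he]; exact h
      have := congrArg String.ofList h'
      simpa using this
    by_cases hinf : e <:+: s
    · -- the coincidence case: both sides equal s.take (|s| - |e|)
      have hinner : e.length < 3 ∧
          s.drop ((PySem.Chars.find s e).toNat + e.length) ++ e <:+ s ∧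
          s.length < (PySem.Chars.find s e).toNat + 3 * e.length := by
        by_contra hno
        exact hnd ⟨by rwa [← he], by rwa [← hs, ← he], by rw [← hs, ← he]; exact hno⟩
      obtain ⟨hl3, hcomb, hL⟩ := hinner
      have hl0 : 0 < e.length := List.length_pos_iff.mpr hene
      have hJn := (pvFind_prefix s e hene hinf).2
      obtain ⟨hsuf, hper⟩ := (pvComb s e (PySem.Chars.find s e).toNat hJn).mp hcomb
      have hocc2 : ¬ e <:+: s.drop ((PySem.Chars.find s e).toNat + 2 * e.length) := by
        intro h
        have := pvInfix_drop_le s e ((PySem.Chars.find s e).toNat + 2 * e.length) hene h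
        omega
      rw [pvAloopNe3 s e h3, if_pos ⟨⟨hl0, hl3⟩, hsuf⟩]
      rw [pvB_eval s e hinf hocc2, hper]
      set J := (PySem.Chars.find s e).toNat with hJ
      have hJm : J ≤ s.length - e.length := pvFind_le_suffix s e hene hsuf
      have htk : s.take J = (s.take (s.length - e.length)).take J := by
        rw [List.take_take]
        congr 1
        omega
      rw [htk, List.take_append_drop]
    · rw [pvAloopNe3 s e h3, if_neg (fun h => hinf h.2.isInfix)]
      have hj : PySem.Chars.findFrom s e ((0 : Nat) : Int) none = -1 :=
        (PySem.Chars.findFrom_natCast_eq_neg_one_iff s e 0 (by omega)).mpr (by simpa using hinf)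
      have hfuel : s.length + 2 = (s.length + 1) + 1 := rfl
      rw [hfuel, pvBloop_none s e _ (s.length + 1) 0 [] hj]
      simp

theorem char_destuffing_changed : Claim_changed_char_destuffing := by
  unfold Claim_changed_char_destuffing
  refine ⟨by decide, by decide, by decide, ?_, by decide, by decide⟩
  show char_destuffing "aGObc" ["STX", "ETX"] "GO" = "aGObc"
  unfold char_destuffing
  rw [pvAloopNe3 _ _ (by decide), if_neg (by decide)]
  decide

theorem char_destuffing_tight : Claim_exact_char_destuffing := by
  intro stuffed flag esc _ hpre hd heq
  obtain ⟨h3, hinf, hninner⟩ := hd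
  have hene : esc.toList ≠ [] := by
    intro h
    apply hpre
    have := congrArg String.ofList h
    simpa using this
  simp only [char_destuffing, char_destuffing_alt] at heq
  have hlist := pvOfList_inj heq
  set s := stuffed.toList with hs
  set e := esc.toList with he
  rw [pvAloopNe3 s e h3] at hlist
  have hl0 : 0 < e.length := List.length_pos_iff.mpr hene
  obtain ⟨hne', hF0, hFf⟩ := pvFind_facts s e hinf
  set J := (PySem.Chars.find s e).toNat with hJ
  have hJF : J = (PySem.Chars.findFrom s e ((0 : Nat) : Int) none).toNat := by rw [hFf]
  have hJn : J + e.length ≤ s.length := by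
    have hspec := PySem.Chars.findFrom_natCast_spec s e 0 (by omega) hne'
    have := pvInfix_drop_le s e (PySem.Chars.findFrom s e ((0 : Nat) : Int) none).toNat hene
      hspec.2.1.isInfix
    omega
  by_cases hc : (0 < e.length ∧ e.length < 3) ∧ e <:+ s
  · rw [if_pos hc] at hlist
    have hLn : e.length ≤ s.length := hc.2.length_le
    by_cases hocc2 : e <:+: s.drop (J + 2 * e.length)
    · -- two occurrences: B is at least 2·|e| shorter than s, A only |e| shorter
      have hle2' := pvInfix_drop_le s e (J + 2 * e.length) hene hocc2
      have hle2 : J + 2 * e.length ≤ s.length := by omega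
      have hj2 : PySem.Chars.findFrom s e ((J + 2 * e.length : Nat) : Int) none ≠ -1 := by
        intro h
        exact (PySem.Chars.findFrom_natCast_eq_neg_one_iff s e _ hle2).mp h hocc2
      have hlen := pvB_len2 s e hl0 (s.length + 2) 0 [] hne' (by rw [← hJF]; exact hj2)
      have hA : (s.take (s.length - e.length)).length = s.length - e.length := by simp
      have := congrArg List.length hlist
      rw [hA] at this
      simp only [List.length_nil] at hlen
      omega
    · -- one occurrence, but deleting it differs from deleting the trailing one
      have hper : ¬ s.drop (J + e.length) = (s.take (s.length - e.length)).drop J := by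
        intro hp
        have hcomb : s.drop (J + e.length) ++ e <:+ s :=
          (pvComb s e J hJn).mpr ⟨hc.2, hp⟩
        have hper' : s.drop (J + e.length) <+: s.drop J := by
          rw [hp, List.drop_take]
          exact List.take_prefix _ _
        rcases Nat.lt_or_ge s.length (J + 3 * e.length) with hL | hL
        · exact hninner ⟨hc.1.2, hcomb, hL⟩
        · exact hocc2 (pvPer_occ s e J (pvFind_prefix s e hene hinf).1 hper' hL).isInfix
      rw [pvB_eval s e hinf hocc2] at hlist
      have hJm : J ≤ s.length - e.length := pvFind_le_suffix s e hene hc.2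
      have htk : s.take (s.length - e.length) =
          s.take J ++ (s.take (s.length - e.length)).drop J := by
        nth_rewrite 1 [← List.take_append_drop J (s.take (s.length - e.length))]
        rw [List.take_take]
        congr 2
        omega
      rw [htk] at hlist
      simp only [← hJ] at hlist
      exact hper (List.append_cancel_left hlist).symm
  · -- A leaves s unchanged while B deletes at least one occurrence
    rw [if_neg hc] at hlist
    have hlen := pvB_len1 s e hl0 (s.length + 2) 0 [] hne'
    have := congrArg List.length hlist
    simp only [List.length_nil] at hlen
    omega
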